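-- pv_equiv track=rewrite | github.com/etoumey/bodyStats | tripy.py | getTimeInZones
-- ===== SOURCE A (Python) =====
-- def getTimeInZones(HR, t, zones):
-- 	tInZones = [0, 0, 0, 0, 0]  # Initialize at zero
-- 	for i in range(0,len(HR)-1):
-- 		if HR[i] < zones[0]:
-- 			tInZones[0] += 1
-- 		elif HR[i] < zones[2]:
-- 			tInZones[1] += 1
-- 		elif HR[i] < zones[3]:
-- 			tInZones[2] += 1
-- 		elif HR[i] < zones[4]:
-- 			tInZones[3] += 1
-- 		else:
-- 			tInZones[4] += 1
-- 	return tInZones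
-- ===== SOURCE B (Python) =====
-- def getTimeInZones(HR, t, zones):
--     rest = HR[:-1]
--     counts = []
--     for k in (0, 2, 3, 4):
--         counts.append(sum(1 for h in rest if h < zones[k]))
--         rest = [h for h in rest if h >= zones[k]]
--     counts.append(len(rest))
--     return counts
-- ===== Notes on version B (the rewrite author's own statement) =====
-- stated objective: alternative
-- what changed: Replaces the stateful elif-loop over indices with successive partition filtering: for each zone bound in turn B counts the remaining samples below it and removes them from the pool, and the last bucket is the leftover pool; Pre_ excludes inputs where the lazy elif chain would raise IndexError on a too-short zones list.
import Mathlib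
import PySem

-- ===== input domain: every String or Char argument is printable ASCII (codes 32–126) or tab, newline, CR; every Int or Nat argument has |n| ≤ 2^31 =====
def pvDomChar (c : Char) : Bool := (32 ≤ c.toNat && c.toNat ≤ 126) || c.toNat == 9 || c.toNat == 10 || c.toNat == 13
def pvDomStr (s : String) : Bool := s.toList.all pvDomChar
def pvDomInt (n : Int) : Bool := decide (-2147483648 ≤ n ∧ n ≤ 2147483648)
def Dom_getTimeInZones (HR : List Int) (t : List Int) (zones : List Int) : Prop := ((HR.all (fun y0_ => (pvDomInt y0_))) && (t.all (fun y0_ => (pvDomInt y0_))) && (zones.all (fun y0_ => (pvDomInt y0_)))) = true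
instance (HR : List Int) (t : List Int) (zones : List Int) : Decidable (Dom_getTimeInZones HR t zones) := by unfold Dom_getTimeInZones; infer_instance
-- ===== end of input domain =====

-- B replaces A's stateful elif-loop by successive partition filtering over the
-- sample pool; same cost, different decomposition.

-- ===== PORT A =====
-- one loop iteration: the elif chain updating the mutable 5-bucket list
def pvStepA (HR : List Int) (zones : List Int) (acc : List Int) (i : Int) : List Int :=
  let h := PySem.List.pyGetD HR i 0
  if h < PySem.List.pyGetD zones 0 0 then acc.set 0 (acc.getD 0 0 + 1)
  else if h < PySem.List.pyGetD zones 2 0 then acc.set 1 (acc.getD 1 0 + 1)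
  else if h < PySem.List.pyGetD zones 3 0 then acc.set 2 (acc.getD 2 0 + 1)
  else if h < PySem.List.pyGetD zones 4 0 then acc.set 3 (acc.getD 3 0 + 1)
  else acc.set 4 (acc.getD 4 0 + 1)

def getTimeInZones (HR : List Int) (t : List Int) (zones : List Int) : List Int :=
  (PySem.List.pyRange 0 ((HR.length : Int) - 1) 1).foldl (pvStepA HR zones) [0, 0, 0, 0, 0]

-- ===== PORT B =====
-- one pass of Source B's loop: count the pool elements below the next bound, then
-- drop them from the pool
def pvStepB (zones : List Int) (st : List Int × List Int) (k : Int) : List Int × List Int :=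
  (st.1 ++ [((st.2.filter (fun h => decide (h < PySem.List.pyGetD zones k 0))).length : Int)],
   st.2.filter (fun h => decide (PySem.List.pyGetD zones k 0 ≤ h)))

def getTimeInZones_alt (HR : List Int) (t : List Int) (zones : List Int) : List Int :=
  let st := [(0 : Int), 2, 3, 4].foldl (pvStepB zones) ([], PySem.List.slice HR none (some (-1)))
  st.1 ++ [(st.2.length : Int)]

-- ===== PRECONDITION & SPEC =====
-- Pre_ is exactly the set of inputs on which Python A returns normally: with at
-- least two HR samples, the lazy elif chain raises IndexError as soon as some
-- sample needs a zone bound that zones is too short to provide (B, reading each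
-- bound only while samples remain in the pool, raises on exactly the same inputs).
def Pre_getTimeInZones (HR : List Int) (t : List Int) (zones : List Int) : Prop :=
  HR.dropLast = [] ∨
    (1 ≤ zones.length ∧
      ((∀ h ∈ HR.dropLast, h < zones.getD 0 0) ∨
       (3 ≤ zones.length ∧
         ((∀ h ∈ HR.dropLast, h < zones.getD 0 0 ∨ h < zones.getD 2 0) ∨
          (4 ≤ zones.length ∧
            ((∀ h ∈ HR.dropLast, h < zones.getD 0 0 ∨ h < zones.getD 2 0 ∨ h < zones.getD 3 0) ∨
             5 ≤ zones.length))))))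
instance (HR : List Int) (t : List Int) (zones : List Int) : Decidable (Pre_getTimeInZones HR t zones) := by unfold Pre_getTimeInZones; infer_instance
def pvWitness_getTimeInZones : List Int × List Int × List Int :=
  ([100, 150, 200], [], [90, 110, 130, 150, 170])

def Spec_getTimeInZones (HR : List Int) (t : List Int) (zones : List Int) (out : List Int) : Prop := out = getTimeInZones_alt HR t zones
instance (HR : List Int) (t : List Int) (zones : List Int) (out : List Int) : Decidable (Spec_getTimeInZones HR t zones out) := by unfold Spec_getTimeInZones; infer_instance

-- ===== CLAIM (what is proved, stated in full; the proofs are below) =====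
def Claim_equal_getTimeInZones : Prop := ∀ (HR : List Int) (t : List Int) (zones : List Int), Dom_getTimeInZones HR t zones → Pre_getTimeInZones HR t zones → Spec_getTimeInZones HR t zones (getTimeInZones HR t zones)

-- ===== LEMMAS AND PROOFS =====

-- the loop body as a function of the sample value only
def pvStep (z0 z2 z3 z4 : Int) (acc : List Int) (h : Int) : List Int :=
  if h < z0 then acc.set 0 (acc.getD 0 0 + 1)
  else if h < z2 then acc.set 1 (acc.getD 1 0 + 1)
  else if h < z3 then acc.set 2 (acc.getD 2 0 + 1)
  else if h < z4 then acc.set 3 (acc.getD 3 0 + 1)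
  else acc.set 4 (acc.getD 4 0 + 1)

theorem pvGetD_dropLast (xs : List Int) (j : Int) (hj0 : 0 ≤ j)
    (hj : j < (xs.dropLast.length : Int)) :
    PySem.List.pyGetD xs j 0 = PySem.List.pyGetD xs.dropLast j 0 := by
  obtain ⟨k, rfl⟩ := Int.eq_ofNat_of_zero_le hj0
  have hk : k < xs.dropLast.length := by exact_mod_cast hj
  have hk' : k < xs.length := by
    simp [List.length_dropLast] at hk; omega
  rw [PySem.List.pyGetD_natCast, PySem.List.pyGetD_natCast,
      List.getD_eq_getElem _ _ hk', List.getD_eq_getElem _ _ hk, List.getElem_dropLast]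

theorem pvA_eq_dropLast_fold (HR t zones : List Int) :
    getTimeInZones HR t zones =
      HR.dropLast.foldl
        (pvStep (PySem.List.pyGetD zones 0 0) (PySem.List.pyGetD zones 2 0)
          (PySem.List.pyGetD zones 3 0) (PySem.List.pyGetD zones 4 0)) [0, 0, 0, 0, 0] := by
  unfold getTimeInZones
  rcases eq_or_ne HR [] with rfl | hne
  · simp [PySem.List.pyRange_one_eq_nil]
  · have hpos : 0 < HR.length := List.length_pos_of_ne_nil hne
    have hlen : ((HR.length : Int) - 1) = ((HR.dropLast.length : Int)) := by
      simp [List.length_dropLast]; omega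
    rw [hlen]
    rw [PySem.List.foldl_congr_mem
      (g := fun acc j =>
        pvStep (PySem.List.pyGetD zones 0 0) (PySem.List.pyGetD zones 2 0)
          (PySem.List.pyGetD zones 3 0) (PySem.List.pyGetD zones 4 0)
          acc (PySem.List.pyGetD HR.dropLast j 0))]
    · exact PySem.List.foldl_pyRange_zero_pyGetD' ..
    · intro acc x hx
      rw [PySem.List.mem_pyRange_one] at hx
      have h0 : 0 ≤ x := hx.1
      have h1 : x < (HR.dropLast.length : Int) := hx.2
      simp only [pvStepA, pvStep, pvGetD_dropLast HR x h0 h1]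

-- the accumulated fold is the five per-zone counts added onto the start buckets
theorem pvFold_counts (z0 z2 z3 z4 : Int) (hs : List Int) (a0 a1 a2 a3 a4 : Int) :
    hs.foldl (pvStep z0 z2 z3 z4) [a0, a1, a2, a3, a4] =
      [a0 + (hs.countP (fun h => decide (h < z0)) : Int),
       a1 + (hs.countP (fun h => decide (¬ h < z0 ∧ h < z2)) : Int),
       a2 + (hs.countP (fun h => decide (¬ h < z0 ∧ ¬ h < z2 ∧ h < z3)) : Int),
       a3 + (hs.countP (fun h => decide (¬ h < z0 ∧ ¬ h < z2 ∧ ¬ h < z3 ∧ h < z4)) : Int),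
       a4 + (hs.countP (fun h => decide (¬ h < z0 ∧ ¬ h < z2 ∧ ¬ h < z3 ∧ ¬ h < z4)) : Int)] := by
  induction hs generalizing a0 a1 a2 a3 a4 with
  | nil => simp
  | cons h tl ih =>
    simp only [List.foldl_cons, List.countP_cons, pvStep]
    by_cases h0 : h < z0 <;> by_cases h2 : h < z2 <;> by_cases h3 : h < z3 <;>
      by_cases h4 : h < z4 <;>
      simp only [h0, h2, h3, h4, if_true, if_false, List.set, List.getD, List.getElem?_cons_zero,
        List.getElem?_cons_succ, Option.getD_some, ih, decide_true, decide_false,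
        not_true, not_false_iff, and_true, and_false] <;>
      simp <;> omega

-- B's successive filters compute the same five counts as A's elif conditions
theorem pvAlt_closed (HR t zones : List Int) :
    getTimeInZones_alt HR t zones =
      [((HR.dropLast.countP (fun h => decide (h < PySem.List.pyGetD zones 0 0))) : Int),
       ((HR.dropLast.countP (fun h => decide (¬ h < PySem.List.pyGetD zones 0 0 ∧ h < PySem.List.pyGetD zones 2 0))) : Int),
       ((HR.dropLast.countP (fun h => decide (¬ h < PySem.List.pyGetD zones 0 0 ∧ ¬ h < PySem.List.pyGetD zones 2 0 ∧ h < PySem.List.pyGetD zones 3 0))) : Int),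
       ((HR.dropLast.countP (fun h => decide (¬ h < PySem.List.pyGetD zones 0 0 ∧ ¬ h < PySem.List.pyGetD zones 2 0 ∧ ¬ h < PySem.List.pyGetD zones 3 0 ∧ h < PySem.List.pyGetD zones 4 0))) : Int),
       ((HR.dropLast.countP (fun h => decide (¬ h < PySem.List.pyGetD zones 0 0 ∧ ¬ h < PySem.List.pyGetD zones 2 0 ∧ ¬ h < PySem.List.pyGetD zones 3 0 ∧ ¬ h < PySem.List.pyGetD zones 4 0))) : Int)] := by
  unfold getTimeInZones_alt
  rw [PySem.List.slice_to_neg_one]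
  simp only [List.foldl_cons, List.foldl_nil, pvStepB, List.nil_append,
    List.cons_append, ← List.countP_eq_length_filter,
    List.countP_filter, List.cons.injEq]
  refine ⟨?_, ?_, ?_, ?_, ?_, trivial⟩ <;>
    norm_cast <;>
    (apply List.countP_congr; intro x _;
     by_cases h0 : x < PySem.List.pyGetD zones 0 0 <;>
       by_cases h2 : x < PySem.List.pyGetD zones 2 0 <;>
       by_cases h3 : x < PySem.List.pyGetD zones 3 0 <;>
       by_cases h4 : x < PySem.List.pyGetD zones 4 0 <;>
       simp [h0, h2, h3, h4] <;> omega)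

-- ===== VERDICT (by name: the statement is the Claim_ definition above) =====
theorem getTimeInZones_spec : Claim_equal_getTimeInZones := by
  intro HR t zones _ _
  unfold Spec_getTimeInZones
  rw [pvA_eq_dropLast_fold HR t zones, pvFold_counts, pvAlt_closed]
  simp
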